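-- pv_equiv track=rewrite | github.com/Vieira-William/vagato | backend/app/services/email_classifier.py | _clean_body
-- ===== SOURCE A (Python) =====
-- SIGNATURE_MARKERS = [
--     '\n-- \n', '\n---\n', '\n____', '\n━━━',
--     'sent from my', 'enviado do meu',
--     'atenciosamente', 'att,', 'att.',
--     'regards,', 'best regards', 'kind regards',
--     'get outlook for', 'baixar outlook',
-- ]
--
-- def _clean_body(text: str) -> str:
--     """Remove assinaturas e limita corpo do e-mail."""
--     if not text:
--         return ""
--     text_lower = text.lower()
--     # Corta na primeira assinatura encontrada
--     earliest = len(text)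
--     for marker in SIGNATURE_MARKERS:
--         pos = text_lower.find(marker)
--         if pos != -1 and pos < earliest:
--             earliest = pos
--     return text[:earliest].strip()[:2000]
-- ===== SOURCE B (Python) =====
-- SIGNATURE_MARKERS = [
--     '\n-- \n', '\n---\n', '\n____', '\n\u2501\u2501\u2501',
--     'sent from my', 'enviado do meu',
--     'atenciosamente', 'att,', 'att.',
--     'regards,', 'best regards', 'kind regards',
--     'get outlook for', 'baixar outlook',
-- ]
--
-- def _clean_body(text: str) -> str:
--     """Remove assinaturas e limita corpo do e-mail."""
--     if not text:
--         return ""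
--     low = text.lower()
--     earliest = next(
--         (i for i in range(len(low))
--          if any(low.startswith(m, i) for m in SIGNATURE_MARKERS)),
--         len(text),
--     )
--     return text[:earliest].strip()[:2000]
-- ===== Notes on version B (the rewrite author's own statement) =====
-- stated objective: alternative
-- what changed: A runs str.find once per signature marker over the whole text and keeps the minimum position; B makes a single left-to-right scan of the lowered text and stops at the first index where any marker starts (a generator with next()), so no per-marker global search and no running minimum.
import Mathlib
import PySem

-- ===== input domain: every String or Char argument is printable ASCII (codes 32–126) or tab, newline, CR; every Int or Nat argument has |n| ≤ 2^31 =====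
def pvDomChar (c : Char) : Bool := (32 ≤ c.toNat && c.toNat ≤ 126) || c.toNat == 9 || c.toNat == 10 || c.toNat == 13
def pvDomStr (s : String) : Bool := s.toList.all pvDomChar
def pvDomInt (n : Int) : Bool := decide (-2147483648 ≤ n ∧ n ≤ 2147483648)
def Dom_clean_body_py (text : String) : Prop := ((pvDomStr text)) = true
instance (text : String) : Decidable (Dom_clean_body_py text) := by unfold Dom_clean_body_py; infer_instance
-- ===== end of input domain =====

-- B replaces A's per-marker str.find minimisation by a single left-to-right scan of the
-- lowered text that stops at the first position where any marker starts (objective: alternative).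

-- ===== PORT A =====
def sigMarkers : List (List Char) :=
  ["\n-- \n".toList, "\n---\n".toList, "\n____".toList, "\n━━━".toList,
   "sent from my".toList, "enviado do meu".toList,
   "atenciosamente".toList, "att,".toList, "att.".toList,
   "regards,".toList, "best regards".toList, "kind regards".toList,
   "get outlook for".toList, "baixar outlook".toList]

-- the body of A's loop: 'pos = text_lower.find(marker); if pos != -1 and pos < earliest: earliest = pos'
def stepA (textLower : List Char) (earliest : Int) (marker : List Char) : Int :=
  let pos := PySem.Chars.find textLower marker
  if pos ≠ -1 ∧ pos < earliest then pos else earliest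

def clean_body_py (text : String) : String :=
  if text.toList.isEmpty then "" else
    String.ofList (PySem.Chars.slice (PySem.Chars.strip (PySem.Chars.slice text.toList none
      (some (sigMarkers.foldl (stepA (PySem.Chars.lower text.toList)) (text.toList.length : Int)))))
      none (some 2000))

-- ===== PORT B =====
-- B: 'earliest = next((i for i in range(len(low)) if any(low.startswith(m, i) for m in SIGNATURE_MARKERS)), len(text))'
def firstHit (low : List Char) (fallback : Nat) : Nat :=
  ((List.range low.length).find? (fun i =>
      sigMarkers.any (fun m => PySem.Chars.startswith (low.drop i) m))).getD fallback

def clean_body_py_alt (text : String) : String :=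
  if text.toList.isEmpty then "" else
    String.ofList (PySem.Chars.slice (PySem.Chars.strip
      (text.toList.take (firstHit (PySem.Chars.lower text.toList) text.toList.length)))
      none (some 2000))

-- ===== PRECONDITION & SPEC =====
def Spec_clean_body_py (text : String) (out : String) : Prop := out = clean_body_py_alt text
instance (text : String) (out : String) : Decidable (Spec_clean_body_py text out) := by unfold Spec_clean_body_py; infer_instance

-- ===== CLAIM (what is proved, stated in full; the proofs are below) =====
def Claim_equal_clean_body_py : Prop := ∀ (text : String), Dom_clean_body_py text → Spec_clean_body_py text (clean_body_py text)

-- ===== LEMMAS AND PROOFS =====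

lemma sigMarkers_ne_nil : ∀ m ∈ sigMarkers, m ≠ [] := by decide

-- A's fold computes a lower bound of acc and of every marker's find position,
-- and is either acc or one of the (non-negative) find positions.
lemma foldA_spec (low : List Char) (ms : List (List Char)) (acc : Int) :
    (ms.foldl (stepA low) acc) ≤ acc ∧
    (∀ m ∈ ms, 0 ≤ PySem.Chars.find low m → (ms.foldl (stepA low) acc) ≤ PySem.Chars.find low m) ∧
    ((ms.foldl (stepA low) acc) = acc ∨
      ∃ m ∈ ms, 0 ≤ PySem.Chars.find low m ∧ (ms.foldl (stepA low) acc) = PySem.Chars.find low m) := by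
  induction ms generalizing acc with
  | nil => simp
  | cons m ms ih =>
    have hge := PySem.Chars.neg_one_le_find low m
    simp only [List.foldl_cons]
    obtain ⟨h1, h2, h3⟩ := ih (stepA low acc m)
    have hle : stepA low acc m ≤ acc := by simp only [stepA]; split_ifs with h <;> omega
    refine ⟨le_trans h1 hle, ?_, ?_⟩
    · intro m' hm' hf
      rcases List.mem_cons.mp hm' with rfl | hm'
      · have : stepA low acc m' ≤ PySem.Chars.find low m' := by
          simp only [stepA]; split_ifs with h <;> omega
        exact le_trans h1 this
      · exact h2 m' hm' hf
    · rcases h3 with h3 | ⟨m', hm', hf, heq⟩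
      · rw [h3]; simp only [stepA]
        by_cases h : PySem.Chars.find low m ≠ -1 ∧ PySem.Chars.find low m < acc
        · rw [if_pos h]
          exact Or.inr ⟨m, List.mem_cons_self, by omega, rfl⟩
        · rw [if_neg h]; exact Or.inl rfl
      · exact Or.inr ⟨m', List.mem_cons_of_mem _ hm', hf, heq⟩

-- a marker prefixed at some position occurs, so its find is non-negative and ≤ that position
lemma find_le_of_prefix_drop (low m : List Char) (j : Nat) (h : m <+: low.drop j) :
    0 ≤ PySem.Chars.find low m ∧ PySem.Chars.find low m ≤ (j : Int) := by
  have hin : PySem.Chars.isIn m low = true :=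
    (PySem.Chars.exists_prefix_drop_iff_isIn m low).mp ⟨j, h⟩
  have hnn : 0 ≤ PySem.Chars.find low m :=
    (PySem.Chars.find_nonneg_iff low m).mpr ((PySem.Chars.isIn_iff_infix m low).mp hin)
  obtain ⟨-, hmin⟩ := PySem.Chars.find_spec hnn
  refine ⟨hnn, ?_⟩
  by_contra hlt
  exact hmin j (by omega) h

-- a non-negative find of a nonempty marker yields a prefix position strictly below the length
lemma hit_of_find_nonneg (low m : List Char) (hm : m ≠ [])
    (h : 0 ≤ PySem.Chars.find low m) :
    (PySem.Chars.find low m).toNat < low.length ∧ m <+: low.drop (PySem.Chars.find low m).toNat := by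
  obtain ⟨hpre, -⟩ := PySem.Chars.find_spec h
  refine ⟨?_, hpre⟩
  by_contra hge
  have : low.drop (PySem.Chars.find low m).toNat = [] := List.drop_eq_nil_of_le (by omega)
  rw [this] at hpre
  exact hm (List.prefix_nil.mp hpre)

-- the central fact: A's fold over find positions equals B's first-hit scan
lemma earliest_eq (tl : List Char) :
    sigMarkers.foldl (stepA (PySem.Chars.lower tl)) (tl.length : Int)
      = ((firstHit (PySem.Chars.lower tl) tl.length : Nat) : Int) := by
  set low := PySem.Chars.lower tl with hlow
  set p : Nat → Bool := fun i =>
      sigMarkers.any (fun m => PySem.Chars.startswith (low.drop i) m) with hp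
  have hpiff : ∀ i, p i = true ↔ ∃ m ∈ sigMarkers, m <+: low.drop i := by
    intro i
    simp [hp, List.any_eq_true, PySem.Chars.startswith_iff]
  obtain ⟨hA1, hA2, hA3⟩ := foldA_spec low sigMarkers (tl.length : Int)
  unfold firstHit
  cases hfind : (List.range low.length).find? p with
  | none =>
    -- no marker occurs anywhere: every find is -1, A's fold stays at len(text)
    have hnone : ∀ i < low.length, ¬ p i = true := fun i hi =>
      List.find?_eq_none.mp hfind i (List.mem_range.mpr hi)
    rcases hA3 with h | ⟨m, hm, hf, -⟩
    · simp [h]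
    · exfalso
      obtain ⟨hlt, hpre⟩ := hit_of_find_nonneg low m (sigMarkers_ne_nil m hm) hf
      exact hnone _ hlt ((hpiff _).mpr ⟨m, hm, hpre⟩)
  | some j =>
    have hpj : p j = true := List.find?_some hfind
    have hjlt : j < low.length := List.mem_range.mp (List.mem_of_find?_eq_some hfind)
    obtain ⟨-, i, hi, hieq, hmin'⟩ := List.find?_eq_some_iff_getElem.mp hfind
    have hieq' : i = j := by simpa using hieq
    have hmin : ∀ k < j, p k = false := by
      intro k hk
      have h0 := hmin' k (by omega)
      rw [List.getElem_range] at h0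
      simpa using h0
    obtain ⟨m, hm, hpre⟩ := (hpiff j).mp hpj
    obtain ⟨hf0, hfle⟩ := find_le_of_prefix_drop low m j hpre
    have hAle : (sigMarkers.foldl (stepA low) (tl.length : Int)) ≤ (j : Int) :=
      le_trans (hA2 m hm hf0) hfle
    have hlen : low.length = tl.length := by simp [hlow, PySem.Chars.lower]
    rcases hA3 with h | ⟨m', hm', hf', heq⟩
    · exfalso; rw [h] at hAle; omega
    · obtain ⟨hlt', hpre'⟩ := hit_of_find_nonneg low m' (sigMarkers_ne_nil m' hm') hf'
      have hge : (j : Int) ≤ PySem.Chars.find low m' := by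
        by_contra hltj
        have hc : p (PySem.Chars.find low m').toNat = true :=
          (hpiff _).mpr ⟨m', hm', hpre'⟩
        rw [hmin (PySem.Chars.find low m').toNat (by omega)] at hc
        simp at hc
      simp only [Option.getD_some]
      omega

-- ===== VERDICT (by name: the statement is the Claim_ definition above) =====
theorem clean_body_py_spec : Claim_equal_clean_body_py := by
  intro text _
  unfold Spec_clean_body_py clean_body_py clean_body_py_alt
  by_cases h : text.toList.isEmpty
  · rw [if_pos h, if_pos h]
  · rw [if_neg h, if_neg h, earliest_eq text.toList]
    rw [PySem.Chars.slice_eq_listSlice text.toList none, PySem.List.slice_to_natCast]
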